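-- pv_equiv track=rewrite | github.com/BlackSatan/DataAnalysis | backend/pca.py | max_n
-- ===== SOURCE A (Python) =====
-- def max_n(array, n):
--     new_array = sorted(array, reverse=True)
--     new_array = new_array[:n]
--     old_links = []
--     for index, i in enumerate(list(new_array)):
--         for iindex, ii in enumerate(array):
--             if ii == i and iindex not in old_links:
--                 old_links.append(iindex)
--                 break
--     return old_links, new_array
-- ===== SOURCE B (Python) =====
-- def max_n(array, n):
--     # queues[v] = the occurrence indices of v in original order; pop the front
--     # as sorted values are consumed, instead of re-scanning the array each time.
--     queues = {}
--     for i, v in enumerate(array):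
--         queues.setdefault(v, []).append(i)
--     new_array = sorted(array, reverse=True)[:n]
--     old_links = [queues[v].pop(0) for v in new_array]
--     return old_links, new_array
-- ===== Notes on version B (the rewrite author's own statement) =====
-- stated objective: faster
-- what changed: A re-scans the whole array (and the growing old_links list) for every one of the top-n values; B builds per-value queues of occurrence indices in one pass over enumerate(array) and pops the front queue entry for each sorted value, removing the quadratic inner scan.
import Mathlib
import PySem

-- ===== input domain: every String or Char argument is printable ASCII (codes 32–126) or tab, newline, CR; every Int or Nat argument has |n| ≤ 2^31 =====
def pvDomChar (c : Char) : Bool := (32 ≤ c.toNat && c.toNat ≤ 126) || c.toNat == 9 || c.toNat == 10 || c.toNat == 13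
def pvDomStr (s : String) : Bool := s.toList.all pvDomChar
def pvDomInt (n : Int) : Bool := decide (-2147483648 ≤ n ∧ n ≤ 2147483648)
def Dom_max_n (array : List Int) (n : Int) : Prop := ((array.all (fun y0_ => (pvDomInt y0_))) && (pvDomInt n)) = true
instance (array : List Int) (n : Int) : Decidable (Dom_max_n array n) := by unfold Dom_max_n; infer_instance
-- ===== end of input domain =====

-- B replaces A's quadratic inner re-scan of the array by per-value index queues built in
-- one pass; both return the same (indices, top-n values) pair. Objective: faster.

-- ===== PORT A =====
-- inner loop: 'for iindex, ii in enumerate(array): if ii == i and iindex not in old_links: append; break'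
def maxNFind (old_links : List Int) (i : Int) : List (Int × Int) → List Int
  | [] => old_links
  | p :: rest =>
    if p.2 == i && !(old_links.contains p.1) then old_links ++ [p.1]
    else maxNFind old_links i rest

def max_n (array : List Int) (n : Int) : List Int × List Int :=
  let new_array := PySem.List.sorted array (fun x => x) true
  let new_array := PySem.List.slice new_array none (some n)
  let old_links := (PySem.List.enumerate new_array 0).foldl
    (fun old_links p => maxNFind old_links p.2 (PySem.List.enumerate array 0)) []
  (old_links, new_array)

-- ===== PORT B =====
-- 'queues[v].pop(0)' for one v of new_array; the queue is provably nonempty there,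
-- so 'headD 0' / 'tail' compute exactly Python's pop(0).
def maxNAltPop (s : PySem.Dict Int (List Int) × List Int) (v : Int) :
    PySem.Dict Int (List Int) × List Int :=
  let q := s.1.getD v []
  (s.1.insert v q.tail, s.2 ++ [q.headD 0])

def max_n_alt (array : List Int) (n : Int) : List Int × List Int :=
  -- 'queues.setdefault(v, []).append(i)' = update key v (default []) by appending i
  let queues := (PySem.List.enumerate array 0).foldl
    (fun d p => d.modify p.2 [] (fun q => q ++ [p.1])) PySem.Dict.empty
  let new_array := PySem.List.slice (PySem.List.sorted array (fun x => x) true) none (some n)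
  let old_links := (new_array.foldl maxNAltPop (queues, [])).2
  (old_links, new_array)

-- ===== PRECONDITION & SPEC =====
def Spec_max_n (array : List Int) (n : Int) (out : List Int × List Int) : Prop := out = max_n_alt array n
instance (array : List Int) (n : Int) (out : List Int × List Int) : Decidable (Spec_max_n array n out) := by unfold Spec_max_n; infer_instance

-- ===== CLAIM (what is proved, stated in full; the proofs are below) =====
def Claim_equal_max_n : Prop := ∀ (array : List Int) (n : Int), Dom_max_n array n → Spec_max_n array n (max_n array n)

-- ===== LEMMAS AND PROOFS =====

-- occurrence indices of value v in array, in increasing order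
def pvOcc (array : List Int) (v : Int) : List Int :=
  ((PySem.List.enumerate array 0).filter (fun p => p.2 == v)).map (fun p => p.1)

theorem pvOcc_pairwise (array : List Int) (v : Int) : (pvOcc array v).Pairwise (· < ·) := by
  unfold pvOcc
  exact List.pairwise_map.mpr ((PySem.List.pairwise_lt_enumerate array 0).filter _)

theorem mem_pvOcc (array : List Int) (v j : Int) :
    j ∈ pvOcc array v ↔ (j, v) ∈ PySem.List.enumerate array 0 := by
  unfold pvOcc
  constructor
  · rintro hj
    obtain ⟨p, hp, rfl⟩ := List.mem_map.mp hj
    obtain ⟨hpE, hpv⟩ := List.mem_filter.mp hp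
    have : p.2 = v := by simpa using hpv
    have hpe : p = (p.1, v) := by rw [← this]
    rwa [← hpe]
  · intro h
    exact List.mem_map.mpr ⟨(j, v), List.mem_filter.mpr ⟨h, by simp⟩, rfl⟩

theorem pvEnum_snd_unique (array : List Int) (j v w : Int)
    (h1 : (j, v) ∈ PySem.List.enumerate array 0)
    (h2 : (j, w) ∈ PySem.List.enumerate array 0) : v = w := by
  obtain ⟨k, hk, he⟩ := (PySem.List.mem_enumerate_iff array 0 _).mp h1
  obtain ⟨k', hk', he'⟩ := (PySem.List.mem_enumerate_iff array 0 _).mp h2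
  have h3 : j = (k : Int) := by simpa using congrArg Prod.fst he
  have h4 : j = (k' : Int) := by simpa using congrArg Prod.fst he'
  have hkk : k = k' := by omega
  have h5 : v = array[k] := by simpa using congrArg Prod.snd he
  have h6 : w = array[k'] := by simpa using congrArg Prod.snd he'
  subst hkk; rw [h5, h6]

theorem length_pvOcc (array : List Int) (v : Int) :
    (pvOcc array v).length = array.count v := by
  unfold pvOcc
  rw [List.length_map, ← List.countP_eq_length_filter]
  conv_rhs => rw [← PySem.List.map_snd_enumerate array 0]
  rw [List.count, List.countP_map]
  rfl

theorem pvMem_take_mono {l : List Int} {m m' : Nat} (h : m ≤ m') {a : Int}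
    (ha : a ∈ l.take m) : a ∈ l.take m' := by
  have he : l.take m = (l.take m').take m := by
    rw [List.take_take, Nat.min_eq_left h]
  rw [he] at ha
  exact List.take_subset _ _ ha

theorem pvMem_take_of_lt {l : List Int} (hp : l.Pairwise (· < ·)) {k : Nat}
    (hk : k < l.length) {x : Int} (hx : x ∈ l) (hlt : x < l[k]) : x ∈ l.take k := by
  obtain ⟨m, hm, rfl⟩ := List.getElem_of_mem hx
  have hgem := List.pairwise_iff_getElem.mp hp
  by_cases hmk : m < k
  · have hm' : m < (l.take k).length := by simp; omega
    have : (l.take k)[m] = l[m] := List.getElem_take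
    exact this ▸ List.getElem_mem hm'
  · exfalso
    rcases Nat.lt_or_ge k m with hkm | hkm
    · exact absurd (hgem k m hk hm hkm) (by omega)
    · have : k = m := by omega
      subst this; omega

theorem pvGetElem_not_mem_take {l : List Int} (hp : l.Pairwise (· < ·)) {k : Nat}
    (hk : k < l.length) : l[k] ∉ l.take k := by
  intro hmem
  obtain ⟨m, hm, hme⟩ := List.getElem_of_mem hmem
  have hm' : m < k := by simp at hm; omega
  have : (l.take k)[m] = l[m]'(by omega) := List.getElem_take
  rw [this] at hme
  exact absurd hme (by have := List.pairwise_iff_getElem.mp hp m k (by omega) hk hm'; omega)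

theorem maxNFind_eq (links : List Int) (v t : Int) :
    ∀ E : List (Int × Int), E.Pairwise (fun p q => p.1 < q.1) → (t, v) ∈ E →
    (∀ p ∈ E, p.1 < t → p.2 = v → p.1 ∈ links) → t ∉ links →
    maxNFind links v E = links ++ [t]
  | [] => by intro _ h _ _; exact absurd h (List.not_mem_nil)
  | p :: rest => by
    intro hpw htv hearly htl
    have hhead := (List.pairwise_cons.mp hpw).1
    have hrest := (List.pairwise_cons.mp hpw).2
    unfold maxNFind
    by_cases hc : (p.2 == v && !(links.contains p.1)) = true
    · rw [if_pos hc]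
      have hv : p.2 = v := by simp at hc; exact hc.1
      have hnl : p.1 ∉ links := by simp at hc; exact hc.2
      have hpt : p.1 = t := by
        rcases lt_trichotomy p.1 t with h | h | h
        · exact absurd (hearly p (List.mem_cons_self) h hv) hnl
        · exact h
        · rcases List.mem_cons.mp htv with he | hm
          · exact absurd (congrArg Prod.fst he).symm (by omega)
          · exact absurd (hhead _ hm) (by omega)
      rw [hpt]
    · rw [if_neg hc]
      have hne : (t, v) ≠ p := by
        intro he
        apply hc
        rw [← he]
        simp
        exact fun h => absurd h htl
      exact maxNFind_eq links v t rest hrest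
        (List.mem_cons.mp htv |>.resolve_left (fun h => hne h))
        (fun q hq hlt hqv => hearly q (List.mem_cons_of_mem _ hq) hlt hqv) htl

theorem pvGetD_build (l : List (Int × Int)) :
    ∀ (d : PySem.Dict Int (List Int)) (v : Int),
    (l.foldl (fun d p => d.modify p.2 [] (fun q => q ++ [p.1])) d).getD v []
      = d.getD v [] ++ (l.filter (fun p => p.2 == v)).map (fun p => p.1) := by
  induction l with
  | nil => intro d v; simp
  | cons p rest ih =>
    intro d v
    simp only [List.foldl_cons, List.filter_cons]
    rw [ih]
    rw [PySem.Dict.getD_modify]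
    by_cases hv : v = p.2
    · rw [if_pos hv]
      subst hv
      simp
    · rw [if_neg hv]
      have : (p.2 == v) = false := by simp; exact fun h => absurd h.symm hv
      rw [this]
      simp

theorem pvMain_fold (array : List Int) :
    ∀ (rest done links : List Int) (d : PySem.Dict Int (List Int)),
    (∀ v, d.getD v [] = (pvOcc array v).drop (done.count v)) →
    (∀ j, j ∈ links ↔ ∃ v, j ∈ (pvOcc array v).take (done.count v)) →
    (∀ v, done.count v + rest.count v ≤ (pvOcc array v).length) →
    rest.foldl (fun links v => maxNFind links v (PySem.List.enumerate array 0)) links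
      = (rest.foldl maxNAltPop (d, links)).2
  | [] => by intros; rfl
  | v :: rest => by
    intro done links d ha hb hc
    have hk : done.count v < (pvOcc array v).length := by
      have := hc v
      rw [List.count_cons_self] at this
      omega
    set k := done.count v with hkdef
    set t := (pvOcc array v)[k] with htdef
    have hdrop : (pvOcc array v).drop k = t :: (pvOcc array v).drop (k + 1) :=
      List.drop_eq_getElem_cons hk
    have htmem : t ∈ pvOcc array v := List.getElem_mem hk
    have htE : (t, v) ∈ PySem.List.enumerate array 0 := (mem_pvOcc array v t).mp htmem
    -- A's inner scan finds exactly t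
    have hA : maxNFind links v (PySem.List.enumerate array 0) = links ++ [t] := by
      apply maxNFind_eq links v t _ (PySem.List.pairwise_lt_enumerate array 0) htE
      · intro p hp hlt hpv
        have hp1 : (p.1, v) ∈ PySem.List.enumerate array 0 := by
          have : p = (p.1, v) := by rw [← hpv]
          rwa [← this]
        have hocc : p.1 ∈ pvOcc array v := (mem_pvOcc array v p.1).mpr hp1
        have : p.1 ∈ (pvOcc array v).take k :=
          pvMem_take_of_lt (pvOcc_pairwise array v) hk hocc hlt
        exact (hb p.1).mpr ⟨v, this⟩
      · intro h
        obtain ⟨w, hw⟩ := (hb t).mp h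
        have htw : t ∈ pvOcc array w := List.take_subset _ _ hw
        have hwv : w = v := by
          have htwE : (t, w) ∈ PySem.List.enumerate array 0 := (mem_pvOcc array w t).mp htw
          exact (pvEnum_snd_unique array t w v htwE htE)
        subst hwv
        exact pvGetElem_not_mem_take (pvOcc_pairwise array w) hk hw
    -- B's pop takes exactly t
    have hB : maxNAltPop (d, links) v
        = (d.insert v ((pvOcc array v).drop (k + 1)), links ++ [t]) := by
      unfold maxNAltPop
      rw [ha v, ← hkdef, hdrop]
      rfl
    rw [List.foldl_cons, List.foldl_cons, hA, hB]
    apply pvMain_fold array rest (done ++ [v]) (links ++ [t])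
    · intro w
      rw [PySem.Dict.getD_insert]
      by_cases hwv : w = v
      · subst hwv
        rw [if_pos rfl]
        have : (done ++ [w]).count w = k + 1 := by
          rw [List.count_append]; simp [hkdef]
        rw [this]
      · rw [if_neg hwv]
        have : (done ++ [v]).count w = done.count w := by
          rw [List.count_append]; simp [List.count_singleton]
          intro h; exact absurd h.symm hwv
        rw [this, ha w]
    · intro j
      constructor
      · intro hj
        rcases List.mem_append.mp hj with hj | hj
        · obtain ⟨w, hw⟩ := (hb j).mp hj
          refine ⟨w, pvMem_take_mono ?_ hw⟩
          rw [List.count_append]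
          omega
        · have hjt : j = t := by simpa using hj
          subst hjt
          refine ⟨v, ?_⟩
          have : (done ++ [v]).count v = k + 1 := by
            rw [List.count_append]; simp [hkdef]
          rw [this, List.take_add_one]
          apply List.mem_append.mpr
          right
          simp [htdef, hk]
      · rintro ⟨w, hw⟩
        by_cases hwv : w = v
        · subst hwv
          have hcv : (done ++ [w]).count w = k + 1 := by
            rw [List.count_append]; simp [hkdef]
          rw [hcv, List.take_add_one] at hw
          rcases List.mem_append.mp hw with hw | hw
          · exact List.mem_append.mpr (Or.inl ((hb j).mpr ⟨w, hw⟩))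
          · have : j = t := by simp [hk] at hw; exact hw
            simp [this]
        · have : (done ++ [v]).count w = done.count w := by
            rw [List.count_append]; simp [List.count_singleton]
            intro h; exact absurd h.symm hwv
          rw [this] at hw
          exact List.mem_append.mpr (Or.inl ((hb j).mpr ⟨w, hw⟩))
    · intro w
      have := hc w
      rw [List.count_append, List.count_cons] at *
      simp at *
      omega

theorem pvSlice_sublist {α : Type} (xs : List α) (a b : Option Int) :
    (PySem.List.slice xs a b).Sublist xs := by
  unfold PySem.List.slice
  exact (List.take_sublist _ _).trans (List.drop_sublist _ _)

theorem pvCount_new_le (array : List Int) (n v : Int) :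
    (PySem.List.slice (PySem.List.sorted array (fun x => x) true) none (some n)).count v
      ≤ array.count v := by
  have h1 := (pvSlice_sublist (PySem.List.sorted array (fun x => x) true) none (some n)).count_le v
  have h2 := (PySem.List.sorted_perm array (fun x => x) true).count_eq v
  omega

-- ===== VERDICT (by name: the statement is the Claim_ definition above) =====
theorem max_n_spec : Claim_equal_max_n := by
  intro array n _
  show max_n array n = max_n_alt array n
  unfold max_n max_n_alt
  have hfold :
      (PySem.List.enumerate
          (PySem.List.slice (PySem.List.sorted array (fun x => x) true) none (some n)) 0).foldl
        (fun old_links p => maxNFind old_links p.2 (PySem.List.enumerate array 0)) []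
      = ((PySem.List.slice (PySem.List.sorted array (fun x => x) true) none (some n)).foldl
          maxNAltPop
          ((PySem.List.enumerate array 0).foldl
            (fun d p => d.modify p.2 [] (fun q => q ++ [p.1])) PySem.Dict.empty, [])).2 := by
    set new_array := PySem.List.slice (PySem.List.sorted array (fun x => x) true) none (some n)
      with hna
    have hm : (PySem.List.enumerate new_array 0).foldl
        (fun old_links p => maxNFind old_links p.2 (PySem.List.enumerate array 0)) []
        = new_array.foldl (fun links v => maxNFind links v (PySem.List.enumerate array 0)) [] := by
      conv_rhs => rw [← PySem.List.map_snd_enumerate new_array 0]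
      rw [List.foldl_map]
    rw [hm]
    apply pvMain_fold array new_array [] []
    · intro v
      rw [pvGetD_build]
      simp [pvOcc]
    · intro j; simp
    · intro v
      rw [hna]
      simp only [List.count_nil, Nat.zero_add, length_pvOcc]
      exact pvCount_new_le array n v
  exact congrArg (fun x => (x, PySem.List.slice (PySem.List.sorted array (fun x => x) true) none (some n))) hfold
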